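-- pv_equiv track=rewrite | github.com/aviYos/bsi-agent | scripts/evaluate_classifier.py | pathogen_matches
-- ===== SOURCE A (Python) =====
-- PATHOGEN_ALIASES = {
--     "ESCHERICHIA COLI": ["E. COLI", "E COLI", "ESCHERICHIA"],
--     "STAPHYLOCOCCUS AUREUS": ["S. AUREUS", "S AUREUS", "STAPH AUREUS", "STAPH AUREUS COAG +"],
--     "KLEBSIELLA PNEUMONIAE": ["K. PNEUMONIAE", "K PNEUMONIAE", "KLEBSIELLA"],
--     "KLEBSIELLA OXYTOCA": ["K. OXYTOCA", "K OXYTOCA"],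
--     "PSEUDOMONAS AERUGINOSA": ["P. AERUGINOSA", "P AERUGINOSA", "PSEUDOMONAS"],
--     "ENTEROCOCCUS FAECALIS": ["E. FAECALIS", "E FAECALIS"],
--     "ENTEROCOCCUS FAECIUM": ["E. FAECIUM", "E FAECIUM"],
--     "ENTEROCOCCUS": ["ENTEROCOCCUS SPECIES", "ENTEROCOCCUS SPP"],
--     "STAPHYLOCOCCUS EPIDERMIDIS": ["S. EPIDERMIDIS", "STAPH EPIDERMIDIS", "COAGULASE NEGATIVE STAPHYLOCOCCI", "COAGULASE-NEGATIVE STAPHYLOCOCCI", "CONS"],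
--     "STAPHYLOCOCCUS HOMINIS": ["S. HOMINIS", "STAPH HOMINIS"],
--     "STAPHYLOCOCCUS, COAGULASE NEGATIVE": ["COAGULASE NEGATIVE STAPHYLOCOCCI", "COAGULASE-NEGATIVE STAPHYLOCOCCI", "CONS", "STAPHYLOCOCCUS EPIDERMIDIS"],
--     "SERRATIA MARCESCENS": ["S. MARCESCENS", "SERRATIA"],
--     "PROTEUS MIRABILIS": ["P. MIRABILIS", "PROTEUS"],
--     "ENTEROBACTER CLOACAE": ["E. CLOACAE", "ENTEROBACTER"],
--     "CANDIDA ALBICANS": ["C. ALBICANS", "CANDIDA"],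
--     "CANDIDA GLABRATA": ["C. GLABRATA"],
--     "STREPTOCOCCUS": ["STREP", "STREPTOCOCCUS SPECIES"],
--     "ACINETOBACTER BAUMANNII": ["A. BAUMANNII", "ACINETOBACTER"],
-- }
--
-- def normalize_pathogen(name: str) -> str:
--     """Normalize pathogen name for comparison."""
--     return name.upper().strip()
--
-- def pathogen_matches(ground_truth: str, prediction: str) -> bool:
--     """Check if prediction matches ground truth, accounting for aliases."""
--     gt = normalize_pathogen(ground_truth)
--     pred = normalize_pathogen(prediction)
--
--     # Exact match
--     if gt == pred:
--         return True
--
--     # Check if prediction contains ground truth or vice versa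
--     if gt in pred or pred in gt:
--         return True
--
--     # Check aliases
--     for canonical, aliases in PATHOGEN_ALIASES.items():
--         canonical_upper = canonical.upper()
--         aliases_upper = [a.upper() for a in aliases]
--
--         # If ground truth matches canonical or any alias
--         gt_matches = (gt == canonical_upper or gt in aliases_upper or
--                       any(a in gt for a in [canonical_upper] + aliases_upper))
--
--         # If prediction matches canonical or any alias
--         pred_matches = (pred == canonical_upper or pred in aliases_upper or
--                         any(a in pred for a in [canonical_upper] + aliases_upper))
--
--         if gt_matches and pred_matches:
--             return True
--
--     return False
-- ===== SOURCE B (Python) =====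
-- PATHOGEN_ALIASES = {
--     "ESCHERICHIA COLI": ["E. COLI", "E COLI", "ESCHERICHIA"],
--     "STAPHYLOCOCCUS AUREUS": ["S. AUREUS", "S AUREUS", "STAPH AUREUS", "STAPH AUREUS COAG +"],
--     "KLEBSIELLA PNEUMONIAE": ["K. PNEUMONIAE", "K PNEUMONIAE", "KLEBSIELLA"],
--     "KLEBSIELLA OXYTOCA": ["K. OXYTOCA", "K OXYTOCA"],
--     "PSEUDOMONAS AERUGINOSA": ["P. AERUGINOSA", "P AERUGINOSA", "PSEUDOMONAS"],
--     "ENTEROCOCCUS FAECALIS": ["E. FAECALIS", "E FAECALIS"],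
--     "ENTEROCOCCUS FAECIUM": ["E. FAECIUM", "E FAECIUM"],
--     "ENTEROCOCCUS": ["ENTEROCOCCUS SPECIES", "ENTEROCOCCUS SPP"],
--     "STAPHYLOCOCCUS EPIDERMIDIS": ["S. EPIDERMIDIS", "STAPH EPIDERMIDIS", "COAGULASE NEGATIVE STAPHYLOCOCCI", "COAGULASE-NEGATIVE STAPHYLOCOCCI", "CONS"],
--     "STAPHYLOCOCCUS HOMINIS": ["S. HOMINIS", "STAPH HOMINIS"],
--     "STAPHYLOCOCCUS, COAGULASE NEGATIVE": ["COAGULASE NEGATIVE STAPHYLOCOCCI", "COAGULASE-NEGATIVE STAPHYLOCOCCI", "CONS", "STAPHYLOCOCCUS EPIDERMIDIS"],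
--     "SERRATIA MARCESCENS": ["S. MARCESCENS", "SERRATIA"],
--     "PROTEUS MIRABILIS": ["P. MIRABILIS", "PROTEUS"],
--     "ENTEROBACTER CLOACAE": ["E. CLOACAE", "ENTEROBACTER"],
--     "CANDIDA ALBICANS": ["C. ALBICANS", "CANDIDA"],
--     "CANDIDA GLABRATA": ["C. GLABRATA"],
--     "STREPTOCOCCUS": ["STREP", "STREPTOCOCCUS SPECIES"],
--     "ACINETOBACTER BAUMANNII": ["A. BAUMANNII", "ACINETOBACTER"],
-- }
--
-- def normalize_pathogen(name: str) -> str: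
--     return name.upper().strip()
--
-- # flat (pattern, canonical-key) table: every group term, uppercased, tagged with its key
-- _TERM_KEYS = [(term.upper(), canonical)
--               for canonical, aliases in PATHOGEN_ALIASES.items()
--               for term in [canonical] + aliases]
--
-- # patterns bucketed by first character: at a position only patterns that can start there are tried
-- _BY_FIRST = {}
-- for _term, _key in _TERM_KEYS:
--     _BY_FIRST.setdefault(_term[0], []).append((_term, _key))
--
-- def _keys_found_in(s: str) -> set:
--     """Multi-pattern scan: walk every start position of s and prefix-test (in place,
--     via startswith with an offset) only the patterns whose first character matches."""
--     found = set()
--     for i in range(len(s)):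
--         for term, key in _BY_FIRST.get(s[i], ()):
--             if key not in found and s.startswith(term, i):
--                 found.add(key)
--     return found
--
-- def pathogen_matches(ground_truth: str, prediction: str) -> bool:
--     gt = normalize_pathogen(ground_truth)
--     pred = normalize_pathogen(prediction)
--     if gt == pred or gt in pred or pred in gt:
--         return True
--     return not _keys_found_in(gt).isdisjoint(_keys_found_in(pred))
-- ===== Notes on version B (the rewrite author's own statement) =====
-- stated objective: alternative
-- what changed: A scans the alias table group by group, running a full substring search for every term on both strings inside one combined AND-loop; B instead flattens the table into (uppercased pattern, key) pairs bucketed by first character and does multi-pattern matching per side: it walks each start position of the string once, prefix-tests only the bucket of patterns that can begin there, accumulates the set of keys found, and answers by set disjointness of the two key sets (the exact-match and bidirectional-substring guards are kept).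
import Mathlib
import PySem

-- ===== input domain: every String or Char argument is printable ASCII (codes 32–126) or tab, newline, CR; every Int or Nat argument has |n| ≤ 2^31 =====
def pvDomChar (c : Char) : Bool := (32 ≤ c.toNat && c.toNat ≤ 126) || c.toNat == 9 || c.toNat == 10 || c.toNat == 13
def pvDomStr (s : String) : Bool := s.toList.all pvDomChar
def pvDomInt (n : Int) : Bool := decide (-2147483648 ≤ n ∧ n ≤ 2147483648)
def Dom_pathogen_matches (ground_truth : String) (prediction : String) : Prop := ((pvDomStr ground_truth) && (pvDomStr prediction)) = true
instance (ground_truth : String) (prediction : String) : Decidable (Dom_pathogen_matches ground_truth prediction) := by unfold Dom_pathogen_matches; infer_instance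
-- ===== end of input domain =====

-- B keeps the exact/substring guards but replaces A's group-by-group AND-loop of substring
-- searches by naive multi-pattern matching: a flat (pattern, key) table is prefix-tested at
-- every start position of each string, and the two accumulated key sets are tested for disjointness.

-- the module-level PATHOGEN_ALIASES table (dict of canonical -> aliases), shared data constant
def PATHOGEN_ALIASES : List (String × List String) := [
  ("ESCHERICHIA COLI", ["E. COLI", "E COLI", "ESCHERICHIA"]),
  ("STAPHYLOCOCCUS AUREUS", ["S. AUREUS", "S AUREUS", "STAPH AUREUS", "STAPH AUREUS COAG +"]),
  ("KLEBSIELLA PNEUMONIAE", ["K. PNEUMONIAE", "K PNEUMONIAE", "KLEBSIELLA"]),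
  ("KLEBSIELLA OXYTOCA", ["K. OXYTOCA", "K OXYTOCA"]),
  ("PSEUDOMONAS AERUGINOSA", ["P. AERUGINOSA", "P AERUGINOSA", "PSEUDOMONAS"]),
  ("ENTEROCOCCUS FAECALIS", ["E. FAECALIS", "E FAECALIS"]),
  ("ENTEROCOCCUS FAECIUM", ["E. FAECIUM", "E FAECIUM"]),
  ("ENTEROCOCCUS", ["ENTEROCOCCUS SPECIES", "ENTEROCOCCUS SPP"]),
  ("STAPHYLOCOCCUS EPIDERMIDIS", ["S. EPIDERMIDIS", "STAPH EPIDERMIDIS", "COAGULASE NEGATIVE STAPHYLOCOCCI", "COAGULASE-NEGATIVE STAPHYLOCOCCI", "CONS"]),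
  ("STAPHYLOCOCCUS HOMINIS", ["S. HOMINIS", "STAPH HOMINIS"]),
  ("STAPHYLOCOCCUS, COAGULASE NEGATIVE", ["COAGULASE NEGATIVE STAPHYLOCOCCI", "COAGULASE-NEGATIVE STAPHYLOCOCCI", "CONS", "STAPHYLOCOCCUS EPIDERMIDIS"]),
  ("SERRATIA MARCESCENS", ["S. MARCESCENS", "SERRATIA"]),
  ("PROTEUS MIRABILIS", ["P. MIRABILIS", "PROTEUS"]),
  ("ENTEROBACTER CLOACAE", ["E. CLOACAE", "ENTEROBACTER"]),
  ("CANDIDA ALBICANS", ["C. ALBICANS", "CANDIDA"]),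
  ("CANDIDA GLABRATA", ["C. GLABRATA"]),
  ("STREPTOCOCCUS", ["STREP", "STREPTOCOCCUS SPECIES"]),
  ("ACINETOBACTER BAUMANNII", ["A. BAUMANNII", "ACINETOBACTER"])]

def normalize_pathogen (name : String) : String :=
  PySem.Str.strip (PySem.Str.upper name)

-- ===== PORT A =====
def pathogen_matches (ground_truth : String) (prediction : String) : Bool :=
  let gt := normalize_pathogen ground_truth
  let pred := normalize_pathogen prediction
  -- Exact match
  if gt == pred then true
  -- Check if prediction contains ground truth or vice versa
  else if PySem.Str.isIn gt pred || PySem.Str.isIn pred gt then true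
  -- Check aliases: loop over the table, return True on the first group both sides match
  else
    PATHOGEN_ALIASES.any (fun e =>
      let canonical_upper := PySem.Str.upper e.1
      let aliases_upper := e.2.map PySem.Str.upper
      let gt_matches := (gt == canonical_upper) || aliases_upper.contains gt ||
        (canonical_upper :: aliases_upper).any (fun a => PySem.Str.isIn a gt)
      let pred_matches := (pred == canonical_upper) || aliases_upper.contains pred ||
        (canonical_upper :: aliases_upper).any (fun a => PySem.Str.isIn a pred)
      gt_matches && pred_matches)

-- ===== PORT B =====
-- flat (pattern, canonical-key) table: every group term, uppercased, tagged with its key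
def TERM_KEYS : List (String × String) :=
  PATHOGEN_ALIASES.flatMap (fun e => (e.1 :: e.2).map (fun term => (PySem.Str.upper term, e.1)))

-- term[0] — hand port of indexing the first character; exact because every table term is
-- nonempty, so Python's term[0] never raises and equals the head of the character list
def firstChar (t : String) : Char := t.toList.headD 'A'

-- the patterns bucketed by first character (a dict built with setdefault(...).append, i.e.
-- the bucket list grows at the end; exact: insertion order of keys and per-bucket order kept)
def BY_FIRST : PySem.Dict Char (List (String × String)) :=
  TERM_KEYS.foldl
    (fun d tk => PySem.Dict.insert d (firstChar tk.1)
      (PySem.Dict.getD d (firstChar tk.1) [] ++ [tk]))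
    PySem.Dict.empty

-- s.startswith(term, i) — hand port of startswith with a start offset; exact for 0 ≤ i
-- (the only way the loop calls it): it prefix-tests term against s shifted by i
def startswith_from (s t : String) (i : Int) : Bool :=
  PySem.Chars.startswith (s.toList.drop i.toNat) t.toList

-- multi-pattern scan: at each position of s, prefix-test only the bucket of patterns
-- whose first character is s[i]  (s[i] is in range, so pyGet? is some; default unused)
def keys_found_in (s : String) : PySem.Set String :=
  (PySem.List.pyRange 0 (PySem.Str.len s) 1).foldl
    (fun found i =>
      (PySem.Dict.getD BY_FIRST ((PySem.Str.pyGet? s i).getD 'A') []).foldl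
        (fun found tk =>
          if !(PySem.Set.contains found tk.2) && startswith_from s tk.1 i then
            PySem.Set.add found tk.2
          else found)
        found)
    PySem.Set.empty

def pathogen_matches_alt (ground_truth : String) (prediction : String) : Bool :=
  let gt := normalize_pathogen ground_truth
  let pred := normalize_pathogen prediction
  if gt == pred || PySem.Str.isIn gt pred || PySem.Str.isIn pred gt then true
  else !(PySem.Set.isdisjoint (keys_found_in gt) (keys_found_in pred))

-- ===== PRECONDITION & SPEC =====
def Spec_pathogen_matches (ground_truth : String) (prediction : String) (out : Bool) : Prop := out = pathogen_matches_alt ground_truth prediction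
instance (ground_truth : String) (prediction : String) (out : Bool) : Decidable (Spec_pathogen_matches ground_truth prediction out) := by unfold Spec_pathogen_matches; infer_instance

-- ===== CLAIM (what is proved, stated in full; the proofs are below) =====
def Claim_equal_pathogen_matches : Prop := ∀ (ground_truth : String) (prediction : String), Dom_pathogen_matches ground_truth prediction → Spec_pathogen_matches ground_truth prediction (pathogen_matches ground_truth prediction)

-- ===== LEMMAS AND PROOFS =====

lemma bool_or_absorb (b1 b2 x : Bool) (h1 : b1 = true → x = true) (h2 : b2 = true → x = true) :
    (b1 || b2 || x) = x := by
  cases b1 <;> cases b2 <;> simp_all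

-- A's per-side test (== canonical ∨ ∈ aliases ∨ any term a substring) collapses to
-- "any term of the group, uppercased, is a substring of s".
lemma side_match_eq (s : String) (e : String × List String) :
    ((s == PySem.Str.upper e.1) || (e.2.map PySem.Str.upper).contains s ||
      (PySem.Str.upper e.1 :: e.2.map PySem.Str.upper).any (fun a => PySem.Str.isIn a s))
    = (e.1 :: e.2).any (fun term => PySem.Str.isIn (PySem.Str.upper term) s) := by
  have hX : (PySem.Str.upper e.1 :: e.2.map PySem.Str.upper).any (fun a => PySem.Str.isIn a s)
      = (e.1 :: e.2).any (fun term => PySem.Str.isIn (PySem.Str.upper term) s) := by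
    rw [← List.map_cons, List.any_map]; rfl
  rw [hX]
  apply bool_or_absorb
  · intro h
    rw [beq_iff_eq] at h
    subst h
    simp only [List.any_cons, Bool.or_eq_true]
    exact Or.inl (by rw [PySem.Str.isIn_iff_infix])
  · intro h
    simp only [List.contains_eq_mem, List.mem_map, decide_eq_true_eq] at h
    obtain ⟨t, ht, hts⟩ := h
    simp only [List.any_eq_true, List.mem_cons]
    exact ⟨t, Or.inr ht, by rw [hts, PySem.Str.isIn_iff_infix]⟩

-- the table's keys are pairwise distinct
lemma keys_nodup : (PATHOGEN_ALIASES.map Prod.fst).Nodup := by decide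

-- every pattern in the flat table is a nonempty string
lemma terms_nonempty : ∀ tk ∈ TERM_KEYS, tk.1.toList ≠ [] := by decide

-- what ends up in a bucket of the first-character dict
lemma mem_bucket (l : List (String × String)) (d : PySem.Dict Char (List (String × String)))
    (c : Char) (x : String × String) :
    x ∈ PySem.Dict.getD
        (l.foldl
          (fun d tk => PySem.Dict.insert d (firstChar tk.1)
            (PySem.Dict.getD d (firstChar tk.1) [] ++ [tk]))
          d) c []
    ↔ x ∈ PySem.Dict.getD d c [] ∨ (x ∈ l ∧ firstChar x.1 = c) := by
  induction l generalizing d with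
  | nil => simp
  | cons tk rest ih =>
    rw [List.foldl_cons, ih]
    rw [PySem.Dict.getD_insert]
    by_cases hc : c = firstChar tk.1
    · subst hc
      rw [if_pos rfl]
      simp only [List.mem_append, List.mem_cons, List.not_mem_nil, or_false]
      constructor
      · rintro ((h | rfl) | ⟨hx, hf⟩)
        · exact Or.inl h
        · exact Or.inr ⟨Or.inl rfl, rfl⟩
        · exact Or.inr ⟨Or.inr hx, hf⟩
      · rintro (h | ⟨(rfl | hx), hf⟩)
        · exact Or.inl (Or.inl h)
        · exact Or.inl (Or.inr rfl)
        · exact Or.inr ⟨hx, hf⟩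
    · rw [if_neg hc]
      simp only [List.mem_cons]
      constructor
      · rintro (h | ⟨hx, hf⟩)
        · exact Or.inl h
        · exact Or.inr ⟨Or.inr hx, hf⟩
      · rintro (h | ⟨(rfl | hx), hf⟩)
        · exact Or.inl h
        · exact absurd hf.symm hc
        · exact Or.inr ⟨hx, hf⟩

lemma mem_BY_FIRST (c : Char) (x : String × String) :
    x ∈ PySem.Dict.getD BY_FIRST c [] ↔ x ∈ TERM_KEYS ∧ firstChar x.1 = c := by
  unfold BY_FIRST
  rw [mem_bucket, PySem.Dict.getD_empty]
  simp

-- membership after one step of B's inner loop (one pattern test)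
lemma step_mem (s : String) (i : Int) (found : PySem.Set String) (tk : String × String)
    (x : String) :
    (x ∈ if !(PySem.Set.contains found tk.2) && startswith_from s tk.1 i then
            PySem.Set.add found tk.2
          else found)
    ↔ x ∈ found ∨ (tk.2 = x ∧ startswith_from s tk.1 i = true) := by
  split_ifs with h
  · rw [Bool.and_eq_true, Bool.not_eq_eq_eq_not, Bool.not_true] at h
    rw [PySem.Set.mem_add]
    constructor
    · rintro (h' | rfl)
      · exact Or.inl h'
      · exact Or.inr ⟨rfl, h.2⟩
    · rintro (h' | ⟨rfl, _⟩)
      · exact Or.inl h'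
      · exact Or.inr rfl
  · constructor
    · exact Or.inl
    · rintro (h' | ⟨rfl, hs⟩)
      · exact h'
      · -- the guard failed while the pattern matched: x was already in found
        have hc : PySem.Set.contains found tk.2 = true := by
          cases hcc : PySem.Set.contains found tk.2
          · exact absurd (by rw [hcc, hs]; rfl) h
          · rfl
        exact (PySem.Set.contains_iff _ _).1 hc

-- membership through B's inner fold (one start position, the bucket's patterns)
lemma mem_inner_fold (s : String) (i : Int) (l : List (String × String))
    (found : PySem.Set String) (x : String) :
    x ∈ l.foldl
        (fun found tk =>
          if !(PySem.Set.contains found tk.2) && startswith_from s tk.1 i then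
            PySem.Set.add found tk.2
          else found)
        found
    ↔ x ∈ found ∨ ∃ tk ∈ l, tk.2 = x ∧ startswith_from s tk.1 i = true := by
  induction l generalizing found with
  | nil => simp
  | cons tk rest ih =>
    rw [List.foldl_cons, ih]
    simp only [step_mem, List.mem_cons]
    constructor
    · rintro ((h | ⟨rfl, hs⟩) | ⟨p, hp, rfl, hps⟩)
      · exact Or.inl h
      · exact Or.inr ⟨tk, Or.inl rfl, rfl, hs⟩
      · exact Or.inr ⟨p, Or.inr hp, rfl, hps⟩
    · rintro (h | ⟨p, (rfl | hp), rfl, hps⟩)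
      · exact Or.inl (Or.inl h)
      · exact Or.inl (Or.inr ⟨rfl, hps⟩)
      · exact Or.inr ⟨p, hp, rfl, hps⟩

-- a pattern matching at position i of s necessarily sits in the bucket of s[i]
lemma bucket_complete (s : String) (i : Int) (h0 : 0 ≤ i)
    (tk : String × String) (htk : tk ∈ TERM_KEYS)
    (hsw : startswith_from s tk.1 i = true) :
    tk ∈ PySem.Dict.getD BY_FIRST ((PySem.Str.pyGet? s i).getD 'A') [] := by
  rw [mem_BY_FIRST]
  refine ⟨htk, ?_⟩
  unfold startswith_from at hsw
  rw [PySem.Chars.startswith_iff] at hsw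
  obtain ⟨rest, hrest⟩ := hsw
  have hne := terms_nonempty tk htk
  have hhead : (s.toList.drop i.toNat).head? = tk.1.toList.head? := by
    rw [← hrest]
    cases htl : tk.1.toList with
    | nil => exact absurd htl hne
    | cons a tl => simp
  rw [List.head?_drop] at hhead
  have hi : PySem.Str.pyGet? s i = s.toList[i.toNat]? := by
    conv_lhs => rw [show i = (i.toNat : Int) from (Int.toNat_of_nonneg h0).symm]
    rw [PySem.Str.pyGet?_natCast]
  rw [hi, hhead]
  cases htl : tk.1.toList with
  | nil => exact absurd htl hne
  | cons a tl => simp [firstChar, htl]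

-- membership through B's outer fold (over the list of start positions)
lemma mem_outer_fold (s : String) (idxs : List Int) (init : PySem.Set String) (x : String) :
    x ∈ idxs.foldl
        (fun found i =>
          (PySem.Dict.getD BY_FIRST ((PySem.Str.pyGet? s i).getD 'A') []).foldl
            (fun found tk =>
              if !(PySem.Set.contains found tk.2) && startswith_from s tk.1 i then
                PySem.Set.add found tk.2
              else found)
            found)
        init
    ↔ x ∈ init ∨ ∃ i ∈ idxs,
        ∃ tk ∈ PySem.Dict.getD BY_FIRST ((PySem.Str.pyGet? s i).getD 'A') [],
          tk.2 = x ∧ startswith_from s tk.1 i = true := by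
  induction idxs generalizing init with
  | nil => simp
  | cons i rest ih =>
    rw [List.foldl_cons, ih]
    simp only [mem_inner_fold, List.mem_cons]
    constructor
    · rintro ((h | ⟨tk, htk, rfl, hps⟩) | ⟨j, hj, tk, htk, rfl, hps⟩)
      · exact Or.inl h
      · exact Or.inr ⟨i, Or.inl rfl, tk, htk, rfl, hps⟩
      · exact Or.inr ⟨j, Or.inr hj, tk, htk, rfl, hps⟩
    · rintro (h | ⟨j, (rfl | hj), tk, htk, rfl, hps⟩)
      · exact Or.inl (Or.inl h)
      · exact Or.inl (Or.inr ⟨tk, htk, rfl, hps⟩)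
      · exact Or.inr ⟨j, hj, tk, htk, rfl, hps⟩

-- a nonempty pattern starts at some scanned position of s iff it is a substring of s
lemma exists_pos_startswith_iff (s t : String) (hne : t.toList ≠ []) :
    (∃ i ∈ PySem.List.pyRange 0 (PySem.Str.len s) 1, startswith_from s t i = true)
    ↔ PySem.Str.isIn t s = true := by
  have hsw : ∀ i : Int, (startswith_from s t i = true ↔ t.toList <+: s.toList.drop i.toNat) := by
    intro i
    unfold startswith_from
    rw [PySem.Chars.startswith_iff]
  rw [PySem.Str.isIn_eq, ← PySem.Chars.exists_prefix_drop_iff_isIn]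
  constructor
  · rintro ⟨i, _, hsw'⟩
    exact ⟨i.toNat, (hsw i).1 hsw'⟩
  · rintro ⟨j, hj⟩
    have hjlt : j < s.toList.length := by
      by_contra hge
      rw [not_lt] at hge
      rw [List.drop_eq_nil_of_le hge, List.prefix_nil] at hj
      exact hne hj
    refine ⟨(j : Int), ?_, (hsw _).2 (by simpa using hj)⟩
    rw [PySem.List.mem_pyRange_one, PySem.Str.len_eq]
    exact ⟨Int.natCast_nonneg j, by exact_mod_cast hjlt⟩

-- characterization of B's per-side key set
lemma mem_keys_found_in (s x : String) :
    x ∈ keys_found_in s ↔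
      ∃ e ∈ PATHOGEN_ALIASES, e.1 = x ∧
        (e.1 :: e.2).any (fun term => PySem.Str.isIn (PySem.Str.upper term) s) = true := by
  unfold keys_found_in
  rw [mem_outer_fold]
  simp only [PySem.Set.empty, List.not_mem_nil, false_or]
  have flat : ∀ tk : String × String, tk ∈ TERM_KEYS ↔
      ∃ e ∈ PATHOGEN_ALIASES, ∃ term ∈ (e.1 :: e.2), tk = (PySem.Str.upper term, e.1) := by
    intro tk
    unfold TERM_KEYS
    simp only [List.mem_flatMap, List.mem_map]
    constructor
    · rintro ⟨e, he, term, hterm, rfl⟩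
      exact ⟨e, he, term, hterm, rfl⟩
    · rintro ⟨e, he, term, hterm, rfl⟩
      exact ⟨e, he, term, hterm, rfl⟩
  constructor
  · rintro ⟨i, hi, tk, htk, rfl, hps⟩
    have htk' : tk ∈ TERM_KEYS := ((mem_BY_FIRST _ _).1 htk).1
    obtain ⟨e, he, term, hterm, rfl⟩ := (flat tk).1 htk'
    refine ⟨e, he, rfl, ?_⟩
    rw [List.any_eq_true]
    refine ⟨term, hterm, ?_⟩
    rw [← exists_pos_startswith_iff s _ (terms_nonempty _ htk')]
    exact ⟨i, hi, hps⟩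
  · rintro ⟨e, he, rfl, hany⟩
    rw [List.any_eq_true] at hany
    obtain ⟨term, hterm, hin⟩ := hany
    have htk : (PySem.Str.upper term, e.1) ∈ TERM_KEYS :=
      (flat _).2 ⟨e, he, term, hterm, rfl⟩
    obtain ⟨i, hi, hps⟩ :=
      (exists_pos_startswith_iff s _ (terms_nonempty _ htk)).2 hin
    have hrange := (PySem.List.mem_pyRange_one).1 hi
    rw [PySem.Str.len_eq] at hrange
    exact ⟨i, hi, (PySem.Str.upper term, e.1),
      bucket_complete s i hrange.1 _ htk hps, rfl, hps⟩

-- non-disjointness of the two key sets = A's one-pass AND over the table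
lemma not_isdisjoint_eq_any (gt pred : String) :
    (!(PySem.Set.isdisjoint (keys_found_in gt) (keys_found_in pred)))
    = PATHOGEN_ALIASES.any (fun e =>
        (e.1 :: e.2).any (fun term => PySem.Str.isIn (PySem.Str.upper term) gt) &&
        (e.1 :: e.2).any (fun term => PySem.Str.isIn (PySem.Str.upper term) pred)) := by
  rw [Bool.eq_iff_iff, Bool.not_eq_true', Bool.eq_false_iff, Ne, PySem.Set.isdisjoint_iff]
  simp only [List.any_eq_true, Bool.and_eq_true, not_forall]
  constructor
  · rintro ⟨x, hx, hnx⟩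
    rw [mem_keys_found_in] at hx
    obtain ⟨e1, he1, rfl, h1⟩ := hx
    rw [not_not, mem_keys_found_in] at hnx
    obtain ⟨e2, he2, hfst, h2⟩ := hnx
    have : e2 = e1 := List.inj_on_of_nodup_map keys_nodup he2 he1 hfst
    subst this
    rw [List.any_eq_true] at h1 h2
    exact ⟨e2, he2, h1, h2⟩
  · rintro ⟨e, he, h1, h2⟩
    refine ⟨e.1, ?_, ?_⟩
    · rw [mem_keys_found_in]
      exact ⟨e, he, rfl, List.any_eq_true.2 h1⟩
    · rw [not_not, mem_keys_found_in]
      exact ⟨e, he, rfl, List.any_eq_true.2 h2⟩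

-- ===== VERDICT (by name: the statement is the Claim_ definition above) =====
theorem pathogen_matches_spec : Claim_equal_pathogen_matches := by
  intro ground_truth prediction _
  unfold Spec_pathogen_matches pathogen_matches pathogen_matches_alt
  set gt := normalize_pathogen ground_truth
  set pred := normalize_pathogen prediction
  cases hb1 : (gt == pred)
  · cases hb2 : PySem.Str.isIn gt pred
    · cases hb3 : PySem.Str.isIn pred gt
      · simp only [hb1, hb2, hb3, Bool.or_self, if_false, Bool.false_eq_true]
        rw [not_isdisjoint_eq_any]
        refine List.any_congr rfl (fun e => ?_)
        rw [side_match_eq, side_match_eq]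
      · simp only [hb1, hb2, hb3, Bool.or_true, Bool.false_or, reduceIte, ite_self]
    · simp only [hb1, hb2, Bool.true_or, Bool.false_or, reduceIte, ite_self]
  · simp only [hb1, Bool.true_or, reduceIte]
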